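-- pv_equiv track=rewrite | github.com/jjaguilar1gmail/fuzzypuzzy | app/devtools/gen_9x9_backbite_tail_probe.py | head_len_from_givens
-- ===== SOURCE A (Python) =====
-- def head_len_from_givens(givens: list[tuple[int, int, int]]) -> int:
--     values = {v for _, _, v in givens}
--     v = 1
--     hl = 0
--     while v in values:
--         hl += 1
--         v += 1
--     return hl
-- ===== SOURCE B (Python) =====
-- def head_len_from_givens(givens: list[tuple[int, int, int]]) -> int:
--     expected = 1
--     for x in sorted({v for _, _, v in givens}):
--         if x < expected:
--             continue
--         if x == expected:
--             expected += 1
--         else: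
--             break
--     return expected - 1
-- ===== Notes on version B (the rewrite author's own statement) =====
-- stated objective: alternative
-- what changed: Replaces the unbounded while-loop of repeated set-membership probes with a single forward pass over the sorted distinct values, counting the consecutive run 1,2,3,... and breaking at the first gap.
import Mathlib
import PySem

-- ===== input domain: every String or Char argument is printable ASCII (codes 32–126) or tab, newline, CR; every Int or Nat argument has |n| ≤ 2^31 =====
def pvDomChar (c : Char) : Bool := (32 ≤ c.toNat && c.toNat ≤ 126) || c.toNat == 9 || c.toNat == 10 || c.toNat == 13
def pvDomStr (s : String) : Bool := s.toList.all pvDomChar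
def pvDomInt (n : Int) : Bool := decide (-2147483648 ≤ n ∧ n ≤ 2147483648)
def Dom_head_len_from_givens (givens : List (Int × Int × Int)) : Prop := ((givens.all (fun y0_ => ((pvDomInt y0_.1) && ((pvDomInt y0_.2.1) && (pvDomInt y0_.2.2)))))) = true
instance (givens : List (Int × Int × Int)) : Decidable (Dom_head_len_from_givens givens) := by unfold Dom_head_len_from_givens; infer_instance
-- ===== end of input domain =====

-- B replaces A's repeated set-membership probing loop with a single pass over the sorted distinct values (alternative algorithm, same results).


-- ===== PORT A =====
-- 'while v in values' ported with fuel values.length + 1: the loop makes at most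
-- values.length successful membership tests (v takes distinct values 1,2,3,…), so the
-- fuel is never exhausted (this is proved in aLoop_eq_vLoop / the verdict below).
def aLoop (values : PySem.Set Int) : Nat → Int → Int → Int
  | 0, _, hl => hl
  | f + 1, v, hl =>
      if PySem.Set.contains values v then aLoop values f (v + 1) (hl + 1) else hl

def head_len_from_givens (givens : List (Int × Int × Int)) : Int :=
  let values : PySem.Set Int := PySem.Set.ofList (givens.map (fun t => t.2.2))
  aLoop values (values.length + 1) 1 0

-- ===== PORT B =====
-- single forward pass over sorted(set(values)) with counter 'expected'
def bScan : List Int → Int → Int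
  | [], expected => expected - 1
  | x :: r, expected =>
      if x < expected then bScan r expected
      else if x = expected then bScan r (expected + 1)
      else expected - 1

def head_len_from_givens_alt (givens : List (Int × Int × Int)) : Int :=
  bScan (PySem.List.sorted (PySem.Set.ofList (givens.map (fun t => t.2.2))) (fun x => x) false) 1

-- ===== PRECONDITION & SPEC =====
def Spec_head_len_from_givens (givens : List (Int × Int × Int)) (out : Int) : Prop := out = head_len_from_givens_alt givens
instance (givens : List (Int × Int × Int)) (out : Int) : Decidable (Spec_head_len_from_givens givens out) := by unfold Spec_head_len_from_givens; infer_instance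

-- ===== CLAIM (what is proved, stated in full; the proofs are below) =====
def Claim_equal_head_len_from_givens : Prop := ∀ (givens : List (Int × Int × Int)), Dom_head_len_from_givens givens → Spec_head_len_from_givens givens (head_len_from_givens givens)

-- ===== LEMMAS AND PROOFS =====

-- proof-only helper: A's loop rephrased to return the final v - 1 instead of carrying hl
def vLoop (S : List Int) : Nat → Int → Int
  | 0, e => e - 1
  | f + 1, e => if S.contains e then vLoop S f (e + 1) else e - 1

theorem aLoop_eq_vLoop (S : List Int) (f : Nat) :
    ∀ v hl : Int, aLoop S f v hl + v = vLoop S f v + hl + 1 := by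
  induction f with
  | zero => intro v hl; simp [aLoop, vLoop]; ring
  | succ f ih =>
      intro v hl
      simp only [aLoop, vLoop, PySem.Set.contains]
      by_cases h : v ∈ S
      · simp only [List.contains_eq_mem, h, decide_true, if_true]
        have := ih (v + 1) (hl + 1)
        omega
      · simp [h]; omega

theorem vLoop_congr_mem (S T : List Int) (h : ∀ a : Int, a ∈ S ↔ a ∈ T) (f : Nat) :
    ∀ e : Int, vLoop S f e = vLoop T f e := by
  induction f with
  | zero => intro e; rfl
  | succ f ih =>
      intro e
      by_cases he : e ∈ S
      · have ht : e ∈ T := (h e).mp he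
        simp [vLoop, he, ht, ih]
      · have ht : e ∉ T := fun hx => he ((h e).mpr hx)
        simp [vLoop, he, ht]

theorem vLoop_cons_lt (x : Int) (r : List Int) (f : Nat) :
    ∀ e : Int, x < e → vLoop (x :: r) f e = vLoop r f e := by
  induction f with
  | zero => intro e _; rfl
  | succ f ih =>
      intro e hx
      have hne : ¬ e = x := by omega
      by_cases hc : e ∈ r
      · simp [vLoop, hne, hc, ih (e + 1) (by omega)]
      · simp [vLoop, hne, hc]

theorem filter_ge_mono (r : List Int) (e : Int) :
    (r.filter (fun a => decide (e + 1 ≤ a))).length ≤ (r.filter (fun a => decide (e ≤ a))).length := by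
  refine List.Sublist.length_le (List.monotone_filter_right r ?_)
  intro a ha
  simp only [decide_eq_true_eq] at ha ⊢
  omega

theorem vLoop_eq_bScan (xs : List Int) (hp : xs.Pairwise (· < ·)) :
    ∀ (e : Int) (f : Nat), (xs.filter (fun a => decide (e ≤ a))).length + 1 ≤ f →
      vLoop xs f e = bScan xs e := by
  induction xs with
  | nil =>
      intro e f hf
      obtain ⟨f', rfl⟩ : ∃ f', f = f' + 1 := ⟨f - 1, by omega⟩
      simp [vLoop, bScan]
  | cons x r ih =>
      have hlt : ∀ a ∈ r, x < a := by
        intro a ha; exact (List.pairwise_cons.mp hp).1 a ha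
      have hpr : r.Pairwise (· < ·) := (List.pairwise_cons.mp hp).2
      intro e f hf
      rcases lt_trichotomy x e with hx | hx | hx
      · -- x < e : head irrelevant on both sides
        have hfl : ((x :: r).filter (fun a => decide (e ≤ a))) = r.filter (fun a => decide (e ≤ a)) := by
          simp [List.filter_cons]; omega
        rw [vLoop_cons_lt x r f e hx, bScan]
        rw [hfl] at hf
        simp only [if_pos hx]
        exact ih hpr e f hf
      · -- x = e : consume the head, advance expected
        subst hx
        have hfl : ((x :: r).filter (fun a => decide (x ≤ a))).length
            = (r.filter (fun a => decide (x ≤ a))).length + 1 := by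
          simp
        obtain ⟨f', rfl⟩ : ∃ f', f = f' + 1 := ⟨f - 1, by omega⟩
        have hmem : (x :: r).contains x = true := by simp
        simp only [vLoop, hmem, if_true]
        rw [vLoop_cons_lt x r f' (x + 1) (by omega)]
        have hf' : (r.filter (fun a => decide (x + 1 ≤ a))).length + 1 ≤ f' := by
          have := filter_ge_mono r x
          omega
        rw [ih hpr (x + 1) f' hf']
        simp [bScan]
      · -- e < x : e is in neither the head nor the tail
        have hnm : (x :: r).contains e = false := by
          simp only [List.contains_eq_mem, decide_eq_false_iff_not]
          intro hmem
          rcases List.mem_cons.mp hmem with h | h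
          · omega
          · exact absurd (hlt e h) (by omega)
        obtain ⟨f', rfl⟩ : ∃ f', f = f' + 1 := ⟨f - 1, by omega⟩
        simp only [vLoop, hnm, Bool.false_eq_true, if_false, bScan]
        have h1 : ¬ x < e := by omega
        have h2 : ¬ x = e := by omega
        simp [h1, h2]

-- ===== VERDICT (by name: the statement is the Claim_ definition above) =====
theorem head_len_from_givens_spec : Claim_equal_head_len_from_givens := by
  intro givens _
  unfold Spec_head_len_from_givens
  set S : List Int := PySem.Set.ofList (givens.map (fun t => t.2.2)) with hS
  set xs : List Int := PySem.List.sorted S (fun x => x) false with hxs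
  have hA' : head_len_from_givens givens = aLoop S (S.length + 1) 1 0 := rfl
  have hB' : head_len_from_givens_alt givens = bScan xs 1 := rfl
  rw [hA', hB']
  have hperm : xs.Perm S := PySem.List.sorted_perm S (fun x => x) false
  have hA : aLoop S (S.length + 1) 1 0 + 1 = vLoop S (S.length + 1) 1 + 0 + 1 :=
    aLoop_eq_vLoop S (S.length + 1) 1 0
  have hmemeq : ∀ a : Int, a ∈ S ↔ a ∈ xs := fun a => (hperm.mem_iff).symm
  have hpw : xs.Pairwise (· < ·) := PySem.List.sorted_ofList_pairwise_lt _
  have hlen : (xs.filter (fun a => decide ((1:Int) ≤ a))).length + 1 ≤ S.length + 1 := by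
    have h1 := List.length_filter_le (fun a => decide ((1:Int) ≤ a)) xs
    have h2 : xs.length = S.length := hperm.length_eq
    omega
  have := vLoop_congr_mem S xs hmemeq (S.length + 1) 1
  have := vLoop_eq_bScan xs hpw 1 (S.length + 1) hlen
  omega
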